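-- pv_equiv track=rewrite | github.com/soyukke/lean-unsolved | scripts/collatz_graph_scc3.py | reverse_bfs_unbounded
-- ===== SOURCE A (Python) =====
-- def reverse_bfs_unbounded(max_depth, max_nodes=500000):
--     """上界なしの逆BFS"""
--     visited = {1}
--     current_layer = {1}
--     layer_sizes = [1]
--     total_nodes = 1
--
--     for d in range(max_depth):
--         next_layer = set()
--         for n in current_layer:
--             # 子1: 2n
--             child1 = 2 * n
--             if child1 not in visited:
--                 visited.add(child1)
--                 next_layer.add(child1)
--
--             # 子2: (n-1)/3 が奇数正整数
--             if (n - 1) % 3 == 0 and n > 1: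
--                 child2 = (n - 1) // 3
--                 if child2 > 0 and child2 % 2 == 1 and child2 not in visited:
--                     visited.add(child2)
--                     next_layer.add(child2)
--
--         if not next_layer or total_nodes > max_nodes:
--             break
--         current_layer = next_layer
--         layer_sizes.append(len(next_layer))
--         total_nodes += len(next_layer)
--
--     return layer_sizes, total_nodes
-- ===== SOURCE B (Python) =====
-- def reverse_bfs_unbounded(max_depth, max_nodes=500000):
--     """Reverse-Collatz BFS layer counts, without any visited set: in the reverse
--     Collatz tree each node has a unique parent (the forward Collatz map), so the
--     only possible revisit is the trivial cycle member 1, excluded explicitly."""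
--     layer = [1]
--     layer_sizes = [1]
--     total_nodes = 1
--     for _ in range(max_depth):
--         if total_nodes > max_nodes:
--             break
--         odd = [(n - 1) // 3 for n in layer
--                if n > 1 and (n - 1) % 3 == 0
--                and ((n - 1) // 3) % 2 == 1 and (n - 1) // 3 != 1]
--         layer = [2 * n for n in layer] + odd
--         layer_sizes.append(len(layer))
--         total_nodes += len(layer)
--     return layer_sizes, total_nodes
-- ===== Notes on version B (the rewrite author's own statement) =====
-- stated objective: simpler
-- what changed: B drops A's visited set and per-layer set-deduplication entirely: since the forward Collatz map gives every node of the reverse tree a unique parent, the only possible revisit is the cycle node 1, which B excludes with one explicit test, keeping each layer as a plain list (even children then odd children).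
import Mathlib
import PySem

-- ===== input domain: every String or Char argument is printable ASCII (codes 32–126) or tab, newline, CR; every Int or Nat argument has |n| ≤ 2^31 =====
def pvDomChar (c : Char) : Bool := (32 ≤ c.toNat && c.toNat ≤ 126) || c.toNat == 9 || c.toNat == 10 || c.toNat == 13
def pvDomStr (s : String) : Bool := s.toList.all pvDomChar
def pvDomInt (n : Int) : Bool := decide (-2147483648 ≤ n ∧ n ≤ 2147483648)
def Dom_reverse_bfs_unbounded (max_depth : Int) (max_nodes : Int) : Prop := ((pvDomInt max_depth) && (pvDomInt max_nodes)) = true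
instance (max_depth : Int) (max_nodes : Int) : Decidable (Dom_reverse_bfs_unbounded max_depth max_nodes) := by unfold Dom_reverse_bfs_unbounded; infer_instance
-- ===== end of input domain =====

-- B replaces A's visited-set bookkeeping by the fact that in the reverse Collatz tree every
-- node has a unique parent (the forward Collatz map), so only the cycle node 1 can ever be
-- revisited; objective: simpler (no visited set, plain lists).

-- ===== PORT A =====
-- inner loop body: for n in current_layer (state = (visited, next_layer)).
-- Python's sets here are hash sets: membership-tested, inserted into, and iterated in
-- unspecified hash order (PySem leaves set iteration order unmodelled).  They are
-- ported as Std.TreeSet; the equivalence proof is iteration-order-independent (Perm).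
def pvStepA (vn : Std.TreeSet Int × Std.TreeSet Int) (n : Int) : Std.TreeSet Int × Std.TreeSet Int :=
  let c1 := 2 * n
  let s1 : Std.TreeSet Int × Std.TreeSet Int :=
    if vn.1.contains c1 then vn
    else (vn.1.insert c1, vn.2.insert c1)
  if PySem.Int.mod (n - 1) 3 = 0 ∧ n > 1 then
    let c2 := PySem.Int.floordiv (n - 1) 3
    if c2 > 0 ∧ PySem.Int.mod c2 2 = 1 ∧ ¬ s1.1.contains c2 then
      (s1.1.insert c2, s1.2.insert c2)
    else s1
  else s1

-- for d in range(max_depth): … with break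
def pvLoopA (mn : Int) : Nat → Std.TreeSet Int → Std.TreeSet Int → List Int → Int → List Int × Int
  | 0, _visited, _layer, sizes, total => (sizes, total)
  | fuel + 1, visited, layer, sizes, total =>
    let r := layer.toList.foldl pvStepA (visited, (Std.TreeSet.empty : Std.TreeSet Int))
    if r.2.isEmpty ∨ total > mn then (sizes, total)
    else pvLoopA mn fuel r.1 r.2 (sizes ++ [(r.2.size : Int)]) (total + (r.2.size : Int))

def reverse_bfs_unbounded (max_depth : Int) (max_nodes : Int) : List Int × Int :=
  pvLoopA max_nodes max_depth.toNat ((Std.TreeSet.empty : Std.TreeSet Int).insert 1)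
    ((Std.TreeSet.empty : Std.TreeSet Int).insert 1) [1] 1

-- ===== PORT B =====
def pvOddChild (n : Int) : Int := PySem.Int.floordiv (n - 1) 3

def pvOddCond (n : Int) : Bool :=
  decide (n > 1) && (PySem.Int.mod (n - 1) 3 == 0) &&
    (PySem.Int.mod (pvOddChild n) 2 == 1) && (pvOddChild n != 1)

def pvLoopB (mn : Int) : Nat → List Int → List Int → Int → List Int × Int
  | 0, _layer, sizes, total => (sizes, total)
  | fuel + 1, layer, sizes, total =>
    if total > mn then (sizes, total)
    else
      let odd := (layer.filter pvOddCond).map pvOddChild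
      let layer' := layer.map (fun n => 2 * n) ++ odd
      pvLoopB mn fuel layer' (sizes ++ [(layer'.length : Int)]) (total + (layer'.length : Int))

def reverse_bfs_unbounded_alt (max_depth : Int) (max_nodes : Int) : List Int × Int :=
  pvLoopB max_nodes max_depth.toNat [1] [1] 1

-- ===== PRECONDITION & SPEC =====
def Spec_reverse_bfs_unbounded (max_depth : Int) (max_nodes : Int) (out : List Int × Int) : Prop := out = reverse_bfs_unbounded_alt max_depth max_nodes
instance (max_depth : Int) (max_nodes : Int) (out : List Int × Int) : Decidable (Spec_reverse_bfs_unbounded max_depth max_nodes out) := by unfold Spec_reverse_bfs_unbounded; infer_instance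

-- ===== CLAIM (what is proved, stated in full; the proofs are below) =====
def Claim_equal_reverse_bfs_unbounded : Prop := ∀ (max_depth : Int) (max_nodes : Int), Dom_reverse_bfs_unbounded max_depth max_nodes → Spec_reverse_bfs_unbounded max_depth max_nodes (reverse_bfs_unbounded max_depth max_nodes)

-- ===== LEMMAS AND PROOFS =====

-- the children one node contributes to the next layer (2n, plus the odd child when admissible)
def pvKids (n : Int) : List Int :=
  2 * n :: (if pvOddCond n then [pvOddChild n] else [])

-- the forward Collatz map: the unique parent of every node of the reverse tree
def pvPar (c : Int) : Int := if c % 2 = 0 then c / 2 else 3 * c + 1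

-- loop invariant: V = processed ∪ frontier, frontier fresh of V, everything positive,
-- every visited node except 1 has its (unique) parent already processed
def pvInv (V : Std.TreeSet Int) (L : List Int) : Prop := ∃ P : List Int,
  (∀ x, x ∈ V ↔ x ∈ P ∨ x ∈ L) ∧ (∀ x ∈ L, x ∉ P) ∧ (∀ v ∈ V, 1 ≤ v) ∧
  (∀ c ∈ V, c ≠ 1 → pvPar c ∈ P) ∧ 1 ∈ V ∧ L.Nodup ∧ L ≠ []

lemma pvOddCond_spec (n : Int) (h : pvOddCond n = true) :
    1 ≤ pvOddChild n ∧ pvOddChild n % 2 = 1 ∧ pvOddChild n ≠ 1 ∧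
      3 * pvOddChild n + 1 = n := by
  unfold pvOddCond at h
  simp only [Bool.and_eq_true, decide_eq_true_eq, beq_iff_eq, bne_iff_ne] at h
  obtain ⟨⟨⟨hn1, hm3⟩, hodd⟩, hne1⟩ := h
  obtain ⟨k, hk⟩ := (PySem.Int.mod_eq_zero_iff_dvd (n - 1) 3).mp hm3
  have hc : pvOddChild n = k := by
    unfold pvOddChild
    rw [hk, PySem.Int.floordiv_eq_ediv_of_pos (by norm_num)]
    exact Int.mul_ediv_cancel_left k (by norm_num)
  rw [hc] at hodd ⊢
  rw [PySem.Int.mod_eq_emod_of_pos (by norm_num)] at hodd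
  rw [hc] at hne1
  exact ⟨by omega, hodd, hne1, by omega⟩

lemma pvPar_kids {c n : Int} (hc : c ∈ pvKids n) (hn : 1 ≤ n) :
    pvPar c = n ∧ 1 ≤ c ∧ c ≠ 1 := by
  unfold pvKids at hc
  rcases List.mem_cons.mp hc with h | h
  · subst h
    refine ⟨?_, by omega, by omega⟩
    unfold pvPar
    rw [if_pos (Int.mul_emod_right 2 n)]
    exact Int.mul_ediv_cancel_left n (by norm_num)
  · by_cases ho : pvOddCond n = true
    · rw [if_pos ho] at h
      simp only [List.mem_singleton] at h
      subst h
      obtain ⟨h1, h2, h3, h4⟩ := pvOddCond_spec n ho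
      refine ⟨?_, h1, h3⟩
      unfold pvPar
      rw [if_neg (by omega)]
      exact h4
    · simp [ho] at h

lemma pvKids_nodup (n : Int) : (pvKids n).Nodup := by
  unfold pvKids
  by_cases ho : pvOddCond n = true
  · obtain ⟨h1, h2, h3, h4⟩ := pvOddCond_spec n ho
    have : (2 * n) % 2 = 0 := Int.mul_emod_right 2 n
    simp [ho]
    omega
  · simp [ho]

lemma pvFlat_nodup (L : List Int) (hpos : ∀ n ∈ L, 1 ≤ n) (hnd : L.Nodup) :
    (L.flatMap pvKids).Nodup := by
  induction L with
  | nil => simp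
  | cons n t ih =>
    simp only [List.flatMap_cons]
    refine List.nodup_append'.mpr ⟨pvKids_nodup n, ih (fun m hm => hpos m (.tail _ hm)) hnd.of_cons, ?_⟩
    intro c hcn hct
    obtain ⟨m, hmt, hcm⟩ := List.mem_flatMap.mp hct
    have e1 := (pvPar_kids hcn (hpos n (.head _))).1
    have e2 := (pvPar_kids hcm (hpos m (.tail _ hmt))).1
    have : n = m := by rw [← e1, e2]
    exact (List.nodup_cons.mp hnd).1 (this ▸ hmt)

lemma pvMemInsert {t : Std.TreeSet Int} {a x : Int} : x ∈ t.insert a ↔ x = a ∨ x ∈ t := by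
  rw [Std.TreeSet.mem_insert]
  constructor
  · rintro (h | h)
    · exact Or.inl (Int.compare_eq_eq.mp h).symm
    · exact Or.inr h
  · rintro (h | h)
    · exact Or.inl (by subst h; exact Int.compare_eq_eq.mpr rfl)
    · exact Or.inr h

lemma pvContains_eq_false {t : Std.TreeSet Int} {x : Int} (h : x ∉ t) : t.contains x = false := by
  by_contra hne
  have : t.contains x = true := by cases hc : t.contains x <;> simp_all
  exact h (Std.TreeSet.mem_iff_contains.mpr this)

lemma pvContains_eq_true {t : Std.TreeSet Int} {x : Int} (h : x ∈ t) : t.contains x = true :=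
  Std.TreeSet.mem_iff_contains.mp h

lemma pvMemFoldInsert (xs : List Int) (t : Std.TreeSet Int) (x : Int) :
    x ∈ xs.foldl (fun s c => s.insert c) t ↔ x ∈ xs ∨ x ∈ t := by
  induction xs generalizing t with
  | nil => simp
  | cons a xs ih =>
    simp only [List.foldl_cons, ih, pvMemInsert, List.mem_cons]
    tauto

lemma pvToListNodup (t : Std.TreeSet Int) : t.toList.Nodup := by
  have h := Std.TreeSet.distinct_toList (t := t)
  exact h.imp (fun hab => by simpa using hab)

lemma pvStepA_eq (V N : Std.TreeSet Int) (n : Int) (h1 : 1 ∈ V) (_hn : 1 ≤ n)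
    (hf : ∀ c ∈ pvKids n, c ∉ V) :
    pvStepA (V, N) n = ((pvKids n).foldl (fun s c => s.insert c) V,
      (pvKids n).foldl (fun s c => s.insert c) N) := by
  have h2n : 2 * n ∉ V := hf (2 * n) (List.mem_cons_self ..)
  unfold pvStepA
  simp only [pvContains_eq_false h2n, Bool.false_eq_true, if_false]
  by_cases hA : PySem.Int.mod (n - 1) 3 = 0 ∧ n > 1
  · rw [if_pos hA]
    by_cases hodd : PySem.Int.mod (pvOddChild n) 2 = 1
    · by_cases he1 : pvOddChild n = 1
      · have hEmpty : pvOddCond n = false := by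
          unfold pvOddCond; simp [he1]
        have hmemV : (V.insert (2 * n)).contains (PySem.Int.floordiv (n - 1) 3) = true := by
          apply pvContains_eq_true
          have he : pvOddChild n = PySem.Int.floordiv (n - 1) 3 := rfl
          rw [← he, he1]
          exact pvMemInsert.mpr (Or.inr h1)
        rw [if_neg (fun hcond => hcond.2.2 hmemV)]
        simp [pvKids, hEmpty]
      · have hC : pvOddCond n = true := by
          unfold pvOddCond
          simp only [Bool.and_eq_true, decide_eq_true_eq, beq_iff_eq, bne_iff_ne]
          exact ⟨⟨⟨hA.2, hA.1⟩, by simpa using hodd⟩, he1⟩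
        obtain ⟨hp1, hp2, hp3, hp4⟩ := pvOddCond_spec n hC
        have hkid : pvOddChild n ∈ pvKids n := by simp [pvKids, hC]
        have hVN := hf _ hkid
        have hne2n : pvOddChild n ≠ 2 * n := by
          have : (2 * n) % 2 = 0 := Int.mul_emod_right 2 n
          omega
        have hnotin : pvOddChild n ∉ V.insert (2 * n) := by
          rw [pvMemInsert]
          rintro (h | h)
          · exact hne2n h
          · exact hVN h
        have hcond : PySem.Int.floordiv (n - 1) 3 > 0 ∧
            PySem.Int.mod (PySem.Int.floordiv (n - 1) 3) 2 = 1 ∧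
            ¬ (V.insert (2 * n)).contains (PySem.Int.floordiv (n - 1) 3) = true := by
          refine ⟨by have := hp1; unfold pvOddChild at this; omega, hodd, ?_⟩
          show ¬ (V.insert (2 * n)).contains (pvOddChild n) = true
          rw [pvContains_eq_false hnotin]
          simp
        rw [if_pos hcond]
        have hoc : PySem.Int.floordiv (n - 1) 3 = pvOddChild n := rfl
        rw [hoc]
        simp [pvKids, hC]
    · rw [if_neg (by intro h; exact hodd h.2.1)]
      have hEmpty : pvOddCond n = false := by
        unfold pvOddCond
        simp only [Bool.and_eq_false_iff]
        left; right; simpa using hodd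
      simp [pvKids, hEmpty]
  · rw [if_neg hA]
    have hEmpty : pvOddCond n = false := by
      unfold pvOddCond
      rcases not_and_or.mp hA with h | h
      · simp only [Bool.and_eq_false_iff]; left; left; right; simpa using h
      · simp only [Bool.and_eq_false_iff]; left; left; left; simpa using h
    simp [pvKids, hEmpty]

lemma pvFoldA (L : List Int) : ∀ (V N : Std.TreeSet Int), 1 ∈ V →
    (∀ n ∈ L, 1 ≤ n) →
    (∀ n ∈ L, ∀ c ∈ pvKids n, c ∉ V) → (L.flatMap pvKids).Nodup →
    L.foldl pvStepA (V, N) =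
      ((L.flatMap pvKids).foldl (fun s c => s.insert c) V,
       (L.flatMap pvKids).foldl (fun s c => s.insert c) N) := by
  induction L with
  | nil => intro V N _ _ _ _; simp
  | cons n t ih =>
    intro V N h1 hpos hf hnd
    simp only [List.foldl_cons]
    rw [pvStepA_eq V N n h1 (hpos n (.head _)) (hf n (.head _))]
    simp only [List.flatMap_cons] at hnd ⊢
    obtain ⟨hknd, htnd, hdisj⟩ := List.nodup_append'.mp hnd
    rw [ih ((pvKids n).foldl (fun s c => s.insert c) V)
      ((pvKids n).foldl (fun s c => s.insert c) N)
      ((pvMemFoldInsert _ _ _).mpr (Or.inr h1))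
      (fun m hm => hpos m (.tail _ hm)) ?_ htnd]
    · rw [List.foldl_append, List.foldl_append]
    · intro m hm c hc hcV
      have hnotk : c ∉ pvKids n := fun hck =>
        hdisj hck (List.mem_flatMap.mpr ⟨m, hm, hc⟩)
      rcases (pvMemFoldInsert _ _ _).mp hcV with h | h
      · exact hnotk h
      · exact hf m (.tail _ hm) c hc h

lemma pvChildB_perm (L : List Int) :
    (L.flatMap pvKids).Perm
      (L.map (fun n => 2 * n) ++ (L.filter pvOddCond).map pvOddChild) := by
  induction L with
  | nil => simp
  | cons n t ih =>
    simp only [List.flatMap_cons, List.map_cons, List.filter_cons]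
    by_cases hC : pvOddCond n = true
    · have hk : pvKids n = [2 * n, pvOddChild n] := by simp [pvKids, hC]
      rw [hk]
      simp only [hC, if_pos, List.map_cons, List.cons_append]
      refine List.Perm.cons _ ?_
      exact (ih.cons (pvOddChild n)).trans List.perm_middle.symm
    · have hk : pvKids n = [2 * n] := by simp [pvKids, hC]
      rw [hk]
      simp only [hC, Bool.false_eq_true, if_false, List.singleton_append]
      exact ih.cons (2 * n)

lemma pvLoop_eq (mn : Int) (fuel : Nat) : ∀ (V T : Std.TreeSet Int) (LB sizes : List Int)
    (total : Int), T.toList.Perm LB → pvInv V T.toList →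
    pvLoopA mn fuel V T sizes total = pvLoopB mn fuel LB sizes total := by
  induction fuel with
  | zero => intro V T LB sizes total _ _; rfl
  | succ fuel ih =>
    intro V T LB sizes total hperm hInv
    obtain ⟨P, hVP, hLP, hpos, hpar, h1, hnd, hne⟩ := hInv
    have hLpos : ∀ n ∈ T.toList, 1 ≤ n := fun n hn => hpos n ((hVP n).mpr (Or.inr hn))
    have hfreshV : ∀ n ∈ T.toList, ∀ c ∈ pvKids n, c ∉ V := by
      intro n hn c hc hcV
      obtain ⟨hparc, _, hcne⟩ := pvPar_kids hc (hLpos n hn)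
      exact hLP n hn (hparc ▸ hpar c hcV hcne)
    have hflat := pvFlat_nodup T.toList hLpos hnd
    have hfold := pvFoldA T.toList V (Std.TreeSet.empty : Std.TreeSet Int) h1 hLpos hfreshV hflat
    have hFne : T.toList.flatMap pvKids ≠ [] := by
      cases hl : T.toList with
      | nil => exact absurd hl hne
      | cons a t => simp [pvKids]
    -- the next-layer tree and its element list
    have hmem2 : ∀ x, x ∈ (T.toList.flatMap pvKids).foldl
        (fun s c => s.insert c) (Std.TreeSet.empty : Std.TreeSet Int) ↔
        x ∈ T.toList.flatMap pvKids := by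
      intro x
      rw [pvMemFoldInsert]
      simp
    have hpermL : ((T.toList.flatMap pvKids).foldl
        (fun s c => s.insert c) (Std.TreeSet.empty : Std.TreeSet Int)).toList.Perm
        (T.toList.flatMap pvKids) := by
      refine (List.perm_ext_iff_of_nodup (pvToListNodup _) hflat).mpr ?_
      intro x
      rw [Std.TreeSet.mem_toList, hmem2]
    have hpermF : (T.toList.flatMap pvKids).Perm
        ((LB.map fun n => 2 * n) ++ (LB.filter pvOddCond).map pvOddChild) :=
      (List.Perm.flatMap_right pvKids hperm).trans (pvChildB_perm LB)
    have hsize : ((((T.toList.flatMap pvKids).foldl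
        (fun s c => s.insert c) (Std.TreeSet.empty : Std.TreeSet Int)).size : Nat) : Int)
        = (((LB.map fun n => 2 * n) ++ (LB.filter pvOddCond).map pvOddChild).length : Int) := by
      rw [← Std.TreeSet.length_toList, hpermL.length_eq, hpermF.length_eq]
    by_cases hbr : total > mn
    · simp [pvLoopA, pvLoopB, hbr]
    · have hnotEmpty : ((T.toList.flatMap pvKids).foldl
          (fun s c => s.insert c) (Std.TreeSet.empty : Std.TreeSet Int)).isEmpty = false := by
        rw [Std.TreeSet.isEmpty_eq_false_iff_exists_mem]
        rcases List.exists_mem_of_ne_nil _ hFne with ⟨x, hx⟩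
        exact ⟨x, (hmem2 x).mpr hx⟩
      have hInv' : pvInv ((T.toList.flatMap pvKids).foldl (fun s c => s.insert c) V)
          (((T.toList.flatMap pvKids).foldl
            (fun s c => s.insert c) (Std.TreeSet.empty : Std.TreeSet Int)).toList) := by
        refine ⟨P ++ T.toList, ?_, ?_, ?_, ?_,
          (pvMemFoldInsert _ _ _).mpr (Or.inr h1), pvToListNodup _, ?_⟩
        · intro x
          rw [pvMemFoldInsert, Std.TreeSet.mem_toList, hmem2]
          simp only [List.mem_append, hVP x]
          tauto
        · intro x hx
          rw [Std.TreeSet.mem_toList, hmem2] at hx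
          obtain ⟨n, hn, hk⟩ := List.mem_flatMap.mp hx
          have hxV := hfreshV n hn x hk
          simp only [List.mem_append]
          push Not
          exact ⟨fun hP => hxV ((hVP x).mpr (Or.inl hP)), fun hL => hxV ((hVP x).mpr (Or.inr hL))⟩
        · intro v hv
          rcases (pvMemFoldInsert _ _ _).mp hv with h | h
          · obtain ⟨n, hn, hk⟩ := List.mem_flatMap.mp h
            exact (pvPar_kids hk (hLpos n hn)).2.1
          · exact hpos v h
        · intro c hc hcne
          rcases (pvMemFoldInsert _ _ _).mp hc with h | h
          · obtain ⟨n, hn, hk⟩ := List.mem_flatMap.mp h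
            exact List.mem_append_right _ ((pvPar_kids hk (hLpos n hn)).1 ▸ hn)
          · exact List.mem_append_left _ (hpar c h hcne)
        · intro htl
          rcases List.exists_mem_of_ne_nil _ hFne with ⟨x, hx⟩
          have : x ∈ ([] : List Int) := htl ▸ (Std.TreeSet.mem_toList.mpr ((hmem2 x).mpr hx))
          simp at this
      rw [pvLoopA, pvLoopB]
      simp only [hfold, if_neg hbr]
      rw [if_neg (by
        rintro (h | h)
        · rw [hnotEmpty] at h
          exact Bool.false_ne_true h
        · exact hbr h)]
      rw [hsize]
      exact ih _ _ _ _ _ (hpermL.trans hpermF) hInv'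

-- ===== VERDICT (by name: the statement is the Claim_ definition above) =====
theorem reverse_bfs_unbounded_spec : Claim_equal_reverse_bfs_unbounded := by
  intro md mn _
  show reverse_bfs_unbounded md mn = reverse_bfs_unbounded_alt md mn
  unfold reverse_bfs_unbounded reverse_bfs_unbounded_alt
  have htl : ((Std.TreeSet.empty : Std.TreeSet Int).insert 1).toList = [1] := by rfl
  refine pvLoop_eq mn md.toNat _ _ _ _ _ (htl ▸ List.Perm.refl _)
    ⟨[], ?_, ?_, ?_, ?_, ?_, ?_, ?_⟩
  · intro x
    rw [pvMemInsert, htl]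
    simp
  · intro x hx
    simp
  · intro v hv
    rw [pvMemInsert] at hv
    simp at hv
    omega
  · intro c hc hcne
    rw [pvMemInsert] at hc
    simp at hc
    exact absurd hc hcne
  · rw [pvMemInsert]
    simp
  · rw [htl]
    simp
  · rw [htl]
    simp
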